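-- pv_equiv track=rewrite | github.com/Etobimz/CMPUT175-labs | Lab 2-20240918/Lab1Ex2A.py | categorize_rainfall
-- ===== SOURCE A (Python) =====
-- def categorize_rainfall(data):
--     categories = {
--         '[50-60 mm)': [],
--         '[60-70 mm)': [],
--         '[70-80 mm)': [],
--         '[80-90 mm)': [],
--         '[90-100 mm]': []
--     }
--     for city, rainfall in data.items():
--         if 50 <= rainfall < 60:
--             categories['[50-60 mm)'].append((city, rainfall))
--         elif 60 <= rainfall < 70:
--             categories['[60-70 mm)'].append((city, rainfall))
--         elif 70 <= rainfall < 80: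
--             categories['[70-80 mm)'].append((city, rainfall))
--         elif 80 <= rainfall < 90:
--             categories['[80-90 mm)'].append((city, rainfall))
--         elif 90 <= rainfall <= 100:
--             categories['[90-100 mm]'].append((city, rainfall))
--
--     for category in categories:
--         categories[category].sort(key=lambda x: x[1])
--
--     return categories
-- ===== SOURCE B (Python) =====
-- def categorize_rainfall(data):
--     # Sort all cities once by rainfall (stable), then partition the already-
--     # sorted list into the five ranges: each bucket comes out sorted for free.
--     ordered = sorted(data.items(), key=lambda x: x[1])
--     return {
--         '[50-60 mm)': [p for p in ordered if 50 <= p[1] < 60],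
--         '[60-70 mm)': [p for p in ordered if 60 <= p[1] < 70],
--         '[70-80 mm)': [p for p in ordered if 70 <= p[1] < 80],
--         '[80-90 mm)': [p for p in ordered if 80 <= p[1] < 90],
--         '[90-100 mm]': [p for p in ordered if 90 <= p[1] <= 100],
--     }
-- ===== Notes on version B (the rewrite author's own statement) =====
-- stated objective: alternative
-- what changed: B sorts the whole item list once by rainfall and then partitions the already-sorted list into the five ranges by filtering (sort-then-partition), instead of A's distribute-into-buckets-then-sort-each-bucket; stability of the sort makes each filtered bucket identical, list and tie order included.
import Mathlib
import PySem

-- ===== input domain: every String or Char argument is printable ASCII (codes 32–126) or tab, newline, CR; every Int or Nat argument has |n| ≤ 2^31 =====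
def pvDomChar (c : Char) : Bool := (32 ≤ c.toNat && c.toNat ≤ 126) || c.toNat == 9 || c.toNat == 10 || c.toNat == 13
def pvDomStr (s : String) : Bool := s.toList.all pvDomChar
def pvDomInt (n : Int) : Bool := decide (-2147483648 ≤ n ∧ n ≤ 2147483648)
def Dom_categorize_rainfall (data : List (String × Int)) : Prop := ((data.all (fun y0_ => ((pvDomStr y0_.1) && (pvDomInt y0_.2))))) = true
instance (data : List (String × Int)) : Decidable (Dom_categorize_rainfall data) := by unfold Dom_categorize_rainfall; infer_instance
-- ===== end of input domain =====

-- B sorts the whole item list once by rainfall and partitions the sorted list into the five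
-- ranges by filtering, instead of A's distribute-then-sort-each-bucket (objective: alternative).

-- ===== PORT A =====
-- loop body of A's first for-loop (the if/elif chain appending to categories[key])
def pvStepA (d : PySem.Dict String (List (String × Int))) (p : String × Int) :
    PySem.Dict String (List (String × Int)) :=
  if 50 ≤ p.2 ∧ p.2 < 60 then d.modify "[50-60 mm)" [] (· ++ [p])
  else if 60 ≤ p.2 ∧ p.2 < 70 then d.modify "[60-70 mm)" [] (· ++ [p])
  else if 70 ≤ p.2 ∧ p.2 < 80 then d.modify "[70-80 mm)" [] (· ++ [p])
  else if 80 ≤ p.2 ∧ p.2 < 90 then d.modify "[80-90 mm)" [] (· ++ [p])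
  else if 90 ≤ p.2 ∧ p.2 ≤ 100 then d.modify "[90-100 mm]" [] (· ++ [p])
  else d

def categorize_rainfall (data : List (String × Int)) : List (String × List (String × Int)) :=
  let categories : PySem.Dict String (List (String × Int)) :=
    PySem.Dict.mk [("[50-60 mm)", []), ("[60-70 mm)", []), ("[70-80 mm)", []),
                   ("[80-90 mm)", []), ("[90-100 mm]", [])]
  let categories := data.foldl pvStepA categories
  let categories := categories.keys.foldl
    (fun d k => d.modify k [] (fun l => PySem.List.sorted l (fun x => x.2))) categories
  categories.items

-- ===== PORT B =====
def categorize_rainfall_alt (data : List (String × Int)) : List (String × List (String × Int)) :=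
  let ordered := PySem.List.sorted data (fun x => x.2)
  [("[50-60 mm)",  ordered.filter (fun p => decide (50 ≤ p.2 ∧ p.2 < 60))),
   ("[60-70 mm)",  ordered.filter (fun p => decide (60 ≤ p.2 ∧ p.2 < 70))),
   ("[70-80 mm)",  ordered.filter (fun p => decide (70 ≤ p.2 ∧ p.2 < 80))),
   ("[80-90 mm)",  ordered.filter (fun p => decide (80 ≤ p.2 ∧ p.2 < 90))),
   ("[90-100 mm]", ordered.filter (fun p => decide (90 ≤ p.2 ∧ p.2 ≤ 100)))]

-- ===== PRECONDITION & SPEC =====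
def Spec_categorize_rainfall (data : List (String × Int)) (out : List (String × List (String × Int))) : Prop := out = categorize_rainfall_alt data
instance (data : List (String × Int)) (out : List (String × List (String × Int))) : Decidable (Spec_categorize_rainfall data out) := by unfold Spec_categorize_rainfall; infer_instance

-- ===== CLAIM (what is proved, stated in full; the proofs are below) =====
def Claim_equal_categorize_rainfall : Prop := ∀ (data : List (String × Int)), Dom_categorize_rainfall data → Spec_categorize_rainfall data (categorize_rainfall data)

-- ===== LEMMAS AND PROOFS =====

-- inserting an element smaller than everything in the list puts it in front
theorem pv_insertBy_front {α : Type} (before : α → α → Bool) (x : α) (l : List α)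
    (h : ∀ z ∈ l, before x z = true) :
    PySem.List.insertBy before x l = x :: l := by
  cases l with
  | nil => rfl
  | cons y t => simp [PySem.List.insertBy, h y (List.mem_cons_self)]

-- filtering commutes with stable insertion into a key-sorted list
theorem pv_filter_insertBy {α : Type} (key : α → Int) (p : α → Bool) (x : α) (ys : List α)
    (hs : ys.Pairwise (fun a b => key a ≤ key b)) :
    (PySem.List.insertBy (fun a b => decide (key a < key b)) x ys).filter p =
      if p x then PySem.List.insertBy (fun a b => decide (key a < key b)) x (ys.filter p)
      else ys.filter p := by
  induction ys with
  | nil => cases hpx : p x <;> simp [PySem.List.insertBy, hpx]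
  | cons y t ih =>
    rcases List.pairwise_cons.mp hs with ⟨hy, ht⟩
    by_cases hlt : key x < key y
    · have hfront : ∀ z ∈ (y :: t).filter p, decide (key x < key z) = true := by
        intro z hz
        have hzm : z ∈ y :: t := List.mem_of_mem_filter hz
        rcases List.mem_cons.mp hzm with h | h
        · simpa [h] using hlt
        · have := hy z h; simp; omega
      cases hpx : p x
      · simp [PySem.List.insertBy, hlt, hpx]
      · simp only [PySem.List.insertBy, decide_eq_true_eq, if_pos hlt]
        rw [pv_insertBy_front _ _ _ hfront]
        simp [hpx]
    · have hstep : PySem.List.insertBy (fun a b => decide (key a < key b)) x (y :: t)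
          = y :: PySem.List.insertBy (fun a b => decide (key a < key b)) x t := by
        simp [PySem.List.insertBy, hlt]
      rw [hstep]
      cases hpy : p y
      · simp [hpy, ih ht]
      · cases hpx : p x
        · simp [hpy, hpx, ih ht]
        · have hstep2 : PySem.List.insertBy (fun a b => decide (key a < key b)) x (y :: t.filter p)
              = y :: PySem.List.insertBy (fun a b => decide (key a < key b)) x (t.filter p) := by
            simp [PySem.List.insertBy, hlt]
          simp only [List.filter_cons, hpy, hpx, if_true, ih ht, hstep2]

-- the key lemma: filtering the globally sorted list = sorting the filtered list (stability)
theorem pv_filter_sorted {α : Type} (key : α → Int) (p : α → Bool) (xs : List α) :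
    (PySem.List.sorted xs key).filter p = PySem.List.sorted (xs.filter p) key := by
  induction xs using List.reverseRecOn with
  | nil => rfl
  | append_singleton xs x ih =>
    have hA : PySem.List.sorted (xs ++ [x]) key
        = PySem.List.insertBy (fun a b => decide (key a < key b)) x (PySem.List.sorted xs key) := by
      rw [PySem.List.sorted_eq_foldl_insertBy, PySem.List.sorted_eq_foldl_insertBy,
        List.foldl_append]
      rfl
    rw [hA, pv_filter_insertBy key p x _ (PySem.List.sorted_pairwise xs key), ih]
    cases hpx : p x
    · simp [hpx]
    · have : (xs ++ [x]).filter p = xs.filter p ++ [x] := by simp [hpx]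
      rw [this, PySem.List.sorted_eq_foldl_insertBy, PySem.List.sorted_eq_foldl_insertBy,
        List.foldl_append]
      simp

-- one step of A's bucket loop, on a five-key dict literal
theorem pv_stepA_eq (b0 b1 b2 b3 b4 : List (String × Int)) (p : String × Int) :
    pvStepA (PySem.Dict.mk [("[50-60 mm)", b0), ("[60-70 mm)", b1), ("[70-80 mm)", b2),
        ("[80-90 mm)", b3), ("[90-100 mm]", b4)]) p
    = PySem.Dict.mk
        [("[50-60 mm)", b0 ++ (if decide (50 ≤ p.2 ∧ p.2 < 60) then [p] else [])),
         ("[60-70 mm)", b1 ++ (if decide (60 ≤ p.2 ∧ p.2 < 70) then [p] else [])),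
         ("[70-80 mm)", b2 ++ (if decide (70 ≤ p.2 ∧ p.2 < 80) then [p] else [])),
         ("[80-90 mm)", b3 ++ (if decide (80 ≤ p.2 ∧ p.2 < 90) then [p] else [])),
         ("[90-100 mm]", b4 ++ (if decide (90 ≤ p.2 ∧ p.2 ≤ 100) then [p] else []))] := by
  obtain ⟨c, r⟩ := p
  by_cases h0 : 50 ≤ r ∧ r < 60 <;> by_cases h1 : 60 ≤ r ∧ r < 70 <;>
    by_cases h2 : 70 ≤ r ∧ r < 80 <;> by_cases h3 : 80 ≤ r ∧ r < 90 <;>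
    by_cases h4 : 90 ≤ r ∧ r ≤ 100 <;>
    simp [pvStepA, h0, h1, h2, h3, h4, PySem.Dict.modify, PySem.Dict.contains,
      PySem.Dict.getD, PySem.Dict.get?, PySem.Dict.insert] <;> omega

-- the whole bucket loop: each bucket accumulates the filter of the traversed data
theorem pv_loopA (data : List (String × Int)) :
    ∀ b0 b1 b2 b3 b4 : List (String × Int),
    data.foldl pvStepA (PySem.Dict.mk [("[50-60 mm)", b0), ("[60-70 mm)", b1),
        ("[70-80 mm)", b2), ("[80-90 mm)", b3), ("[90-100 mm]", b4)])
    = PySem.Dict.mk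
        [("[50-60 mm)", b0 ++ data.filter (fun p => decide (50 ≤ p.2 ∧ p.2 < 60))),
         ("[60-70 mm)", b1 ++ data.filter (fun p => decide (60 ≤ p.2 ∧ p.2 < 70))),
         ("[70-80 mm)", b2 ++ data.filter (fun p => decide (70 ≤ p.2 ∧ p.2 < 80))),
         ("[80-90 mm)", b3 ++ data.filter (fun p => decide (80 ≤ p.2 ∧ p.2 < 90))),
         ("[90-100 mm]", b4 ++ data.filter (fun p => decide (90 ≤ p.2 ∧ p.2 ≤ 100)))] := by
  induction data with
  | nil => intro b0 b1 b2 b3 b4; simp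
  | cons p t ih =>
    intro b0 b1 b2 b3 b4
    rw [List.foldl_cons, pv_stepA_eq, ih]
    simp only [List.filter_cons]
    cases hp0 : decide (50 ≤ p.2 ∧ p.2 < 60) <;>
      cases hp1 : decide (60 ≤ p.2 ∧ p.2 < 70) <;>
      cases hp2 : decide (70 ≤ p.2 ∧ p.2 < 80) <;>
      cases hp3 : decide (80 ≤ p.2 ∧ p.2 < 90) <;>
      cases hp4 : decide (90 ≤ p.2 ∧ p.2 ≤ 100) <;> simp

-- A's final sorting loop on a five-key dict literal sorts each value in place
theorem pv_sort_loop (c0 c1 c2 c3 c4 : List (String × Int)) :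
    (PySem.Dict.mk [("[50-60 mm)", c0), ("[60-70 mm)", c1), ("[70-80 mm)", c2),
        ("[80-90 mm)", c3), ("[90-100 mm]", c4)]).keys.foldl
      (fun d k => d.modify k [] (fun l => PySem.List.sorted l (fun x => x.2)))
      (PySem.Dict.mk [("[50-60 mm)", c0), ("[60-70 mm)", c1), ("[70-80 mm)", c2),
        ("[80-90 mm)", c3), ("[90-100 mm]", c4)])
    = PySem.Dict.mk [("[50-60 mm)", PySem.List.sorted c0 (fun x => x.2)),
        ("[60-70 mm)", PySem.List.sorted c1 (fun x => x.2)),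
        ("[70-80 mm)", PySem.List.sorted c2 (fun x => x.2)),
        ("[80-90 mm)", PySem.List.sorted c3 (fun x => x.2)),
        ("[90-100 mm]", PySem.List.sorted c4 (fun x => x.2))] := by
  simp [PySem.Dict.keys, PySem.Dict.modify, PySem.Dict.contains, PySem.Dict.getD,
    PySem.Dict.get?, PySem.Dict.insert]

-- ===== VERDICT (by name: the statement is the Claim_ definition above) =====
theorem categorize_rainfall_spec : Claim_equal_categorize_rainfall := by
  intro data _
  unfold Spec_categorize_rainfall categorize_rainfall categorize_rainfall_alt
  simp only []
  rw [pv_loopA data [] [] [] [] []]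
  simp only [List.nil_append]
  rw [pv_sort_loop]
  rw [pv_filter_sorted, pv_filter_sorted, pv_filter_sorted, pv_filter_sorted, pv_filter_sorted]
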